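-- pv_equiv track=rewrite | github.com/Hunzzy/bot-code | node_pos_walls.py | _cluster_1d
-- ===== SOURCE A (Python) =====
-- def _cluster_1d(pairs, tolerance):
--     """
--     `pairs` is a list of (primary_value, secondary_value).
--     Sort by primary, group consecutive entries where adjacent primaries differ
--     by at most `tolerance`.
--     Returns a list of groups, each group being a list of (primary, secondary) tuples.
--     """
--     if not pairs:
--         return []
--     pairs_sorted = sorted(pairs, key=lambda p: p[0])
--     clusters = [[pairs_sorted[0]]]
--     for prev, curr in zip(pairs_sorted, pairs_sorted[1:]):
--         if curr[0] - prev[0] <= tolerance: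
--             clusters[-1].append(curr)
--         else:
--             clusters.append([curr])
--     return clusters
-- ===== SOURCE B (Python) =====
-- def _cluster_1d(pairs, tolerance):
--     """Two-phase: compute break indices on the sorted list, then slice."""
--     if not pairs:
--         return []
--     ps = sorted(pairs, key=lambda p: p[0])
--     n = len(ps)
--     breaks = [i for i in range(1, n) if ps[i][0] - ps[i - 1][0] > tolerance]
--     bounds = [0] + breaks + [n]
--     return [ps[bounds[j]:bounds[j + 1]] for j in range(len(bounds) - 1)]
-- ===== Notes on version B (the rewrite author's own statement) =====
-- stated objective: alternative
-- what changed: Replaces A's single pass that mutates clusters[-1] with a two-phase plan: first collect the break indices where adjacent sorted primaries differ by more than tolerance, then materialise each cluster as one slice between consecutive boundaries.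
import Mathlib
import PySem

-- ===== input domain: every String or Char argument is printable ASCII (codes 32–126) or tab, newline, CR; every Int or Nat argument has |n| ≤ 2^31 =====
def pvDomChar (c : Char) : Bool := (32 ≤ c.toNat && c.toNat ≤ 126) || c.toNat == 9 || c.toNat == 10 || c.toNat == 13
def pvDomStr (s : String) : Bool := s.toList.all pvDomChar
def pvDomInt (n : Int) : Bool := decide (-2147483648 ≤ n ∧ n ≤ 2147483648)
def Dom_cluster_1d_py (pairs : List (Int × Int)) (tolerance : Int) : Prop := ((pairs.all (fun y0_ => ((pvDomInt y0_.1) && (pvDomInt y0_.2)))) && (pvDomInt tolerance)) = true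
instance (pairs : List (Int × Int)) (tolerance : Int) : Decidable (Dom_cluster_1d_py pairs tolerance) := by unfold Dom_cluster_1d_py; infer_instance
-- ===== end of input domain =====

-- B replaces A's single pass mutating clusters[-1] by a two-phase plan (break indices, then slices); same result, similar cost.

-- ===== PORT A =====
-- clusters[-1].append(curr): rebuild the list with the element appended to its last cluster
def pvAppendLast (clusters : List (List (Int × Int))) (x : Int × Int) : List (List (Int × Int)) :=
  match clusters with
  | [] => []
  | [c] => [c ++ [x]]
  | c :: cs => c :: pvAppendLast cs x

def pvStepA (tolerance : Int) (clusters : List (List (Int × Int))) (pc : (Int × Int) × (Int × Int)) : List (List (Int × Int)) :=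
  if pc.2.1 - pc.1.1 ≤ tolerance then pvAppendLast clusters pc.2 else clusters ++ [[pc.2]]

def cluster_1d_py (pairs : List (Int × Int)) (tolerance : Int) : List (List (Int × Int)) :=
  if pairs = [] then []
  else
    let pairs_sorted := PySem.List.sorted pairs (fun p => p.1)
    match pairs_sorted with
    | [] => []  -- unreachable: sorted of a nonempty list is nonempty (pairs_sorted[0] exists)
    | x :: xs => ((x :: xs).zip xs).foldl (pvStepA tolerance) [[x]]

-- ===== PORT B =====
def cluster_1d_py_alt (pairs : List (Int × Int)) (tolerance : Int) : List (List (Int × Int)) :=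
  if pairs = [] then []
  else
    let ps := PySem.List.sorted pairs (fun p => p.1)
    let n : Int := ps.length
    -- indices i of range(1, n) are in range, so ps[i] is pyGetD with a dummy default
    let breaks := (PySem.List.pyRange 1 n 1).filter
      (fun i => tolerance < (PySem.List.pyGetD ps i (0, 0)).1 - (PySem.List.pyGetD ps (i - 1) (0, 0)).1)
    let bounds := 0 :: (breaks ++ [n])
    (PySem.List.pyRange 0 ((bounds.length : Int) - 1) 1).map
      (fun j => PySem.List.slice ps (some (PySem.List.pyGetD bounds j 0)) (some (PySem.List.pyGetD bounds (j + 1) 0)))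

-- ===== PRECONDITION & SPEC =====
def Spec_cluster_1d_py (pairs : List (Int × Int)) (tolerance : Int) (out : List (List (Int × Int))) : Prop := out = cluster_1d_py_alt pairs tolerance
instance (pairs : List (Int × Int)) (tolerance : Int) (out : List (List (Int × Int))) : Decidable (Spec_cluster_1d_py pairs tolerance out) := by unfold Spec_cluster_1d_py; infer_instance

-- ===== CLAIM (what is proved, stated in full; the proofs are below) =====
def Claim_equal_cluster_1d_py : Prop := ∀ (pairs : List (Int × Int)) (tolerance : Int), Dom_cluster_1d_py pairs tolerance → Spec_cluster_1d_py pairs tolerance (cluster_1d_py pairs tolerance)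

-- ===== LEMMAS AND PROOFS =====

-- Reference recursive grouping: altGo tol x xs = the clusters of (x :: xs), first cluster starts with x
def altGo (tolerance : Int) : (Int × Int) → List (Int × Int) → List (List (Int × Int))
  | x, [] => [[x]]
  | x, y :: ys =>
    if y.1 - x.1 ≤ tolerance then
      match altGo tolerance y ys with
      | [] => [[x]]  -- unreachable
      | c :: cs => (x :: c) :: cs
    else [x] :: altGo tolerance y ys

theorem altGo_ne_nil (tolerance : Int) (x : Int × Int) (xs : List (Int × Int)) :
    altGo tolerance x xs ≠ [] := by
  cases xs with
  | nil => simp [altGo]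
  | cons y ys =>
    simp only [altGo]
    split
    · cases h : altGo tolerance y ys <;> simp
    · simp

def pvAttach (c : List (Int × Int)) : List (List (Int × Int)) → List (List (Int × Int))
  | [] => [c]
  | g :: gs => (c ++ g) :: gs

theorem pvAppendLast_append (C : List (List (Int × Int))) (c : List (Int × Int)) (y : Int × Int) :
    pvAppendLast (C ++ [c]) y = C ++ [c ++ [y]] := by
  induction C with
  | nil => simp [pvAppendLast]
  | cons d C ih =>
    cases C with
    | nil => simp [pvAppendLast]
    | cons e C => simpa [pvAppendLast] using ih

theorem foldA_eq_altGo (tolerance : Int) (xs : List (Int × Int)) :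
    ∀ (x : Int × Int) (c : List (Int × Int)) (C : List (List (Int × Int))),
    ((x :: xs).zip xs).foldl (pvStepA tolerance) (C ++ [c ++ [x]]) =
      C ++ pvAttach c (altGo tolerance x xs) := by
  induction xs with
  | nil => intro x c C; simp [altGo, pvAttach]
  | cons y ys ih =>
    intro x c C
    show (((x, y) :: (y :: ys).zip ys).foldl (pvStepA tolerance) (C ++ [c ++ [x]])) = _
    rw [List.foldl_cons]
    by_cases h : y.1 - x.1 ≤ tolerance
    · have hs : pvStepA tolerance (C ++ [c ++ [x]]) (x, y) = C ++ [(c ++ [x]) ++ [y]] := by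
        simp [pvStepA, h, pvAppendLast_append]
      rw [hs, ih y (c ++ [x]) C]
      have := altGo_ne_nil tolerance y ys
      cases hg : altGo tolerance y ys with
      | nil => exact absurd hg this
      | cons g gs => simp [altGo, h, hg, pvAttach]
    · have hs : pvStepA tolerance (C ++ [c ++ [x]]) (x, y) = (C ++ [c ++ [x]]) ++ [[] ++ [y]] := by
        simp [pvStepA, h]
      rw [hs, ih y [] (C ++ [c ++ [x]])]
      have := altGo_ne_nil tolerance y ys
      cases hg : altGo tolerance y ys with
      | nil => exact absurd hg this
      | cons g gs => simp [altGo, h, hg, pvAttach]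

theorem pvAttach_nil (l : List (List (Int × Int))) (h : l ≠ []) : pvAttach [] l = l := by
  cases l with
  | nil => exact absurd rfl h
  | cons g gs => simp [pvAttach]

-- index / slice shift helpers
theorem pyGetD_cons_shift {α : Type} (x : α) (t : List α) (i : Int) (d : α) (h : 1 ≤ i) :
    PySem.List.pyGetD (x :: t) i d = PySem.List.pyGetD t (i - 1) d := by
  obtain ⟨n, rfl⟩ : ∃ n : Nat, i = (n : Int) + 1 := ⟨(i - 1).toNat, by omega⟩
  have h0 : (n : Int) + 1 - 1 = (n : Int) := by ring
  rw [h0]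
  have h1 : ((n + 1 : Nat) : Int) = (n : Int) + 1 := by push_cast; ring
  rw [← h1, PySem.List.pyGetD_natCast, PySem.List.pyGetD_natCast]
  simp

theorem slice_cons_shift {α : Type} (x : α) (t : List α) (a b : Int) (ha : 0 ≤ a) (hb : 0 ≤ b) :
    PySem.List.slice (x :: t) (some (a + 1)) (some (b + 1)) = PySem.List.slice t (some a) (some b) := by
  rw [PySem.List.slice_toNat _ (by omega) (by omega), PySem.List.slice_toNat _ ha hb]
  have h1 : (a + 1).toNat = a.toNat + 1 := by omega
  have h2 : (b + 1).toNat = b.toNat + 1 := by omega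
  simp [h1, h2]

theorem slice_zero_succ {α : Type} (x : α) (t : List α) (r : Int) (hr : 0 ≤ r) :
    PySem.List.slice (x :: t) (some 0) (some (r + 1)) = x :: PySem.List.slice t (some 0) (some r) := by
  rw [PySem.List.slice_toNat _ (by omega) (by omega), PySem.List.slice_toNat _ le_rfl hr]
  have h1 : (r + 1).toNat = r.toNat + 1 := by omega
  simp [h1]

theorem pyRange_shift (a b : Int) :
    PySem.List.pyRange (a + 1) (b + 1) 1 = (PySem.List.pyRange a b 1).map (· + 1) := by
  rw [PySem.List.pyRange_one, PySem.List.pyRange_one, List.map_map]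
  have h : b + 1 - (a + 1) = b - a := by ring
  rw [h]
  exact List.map_congr_left (fun k _ => by simp; ring)

-- pairSlices s l = [s[a:b] for (a,b) adjacent in l]
def pairSlices (s : List (Int × Int)) (l : List Int) : List (List (Int × Int)) :=
  (l.zip l.tail).map (fun p => PySem.List.slice s (some p.1) (some p.2))

theorem pairSlices_cons₂ (s : List (Int × Int)) (a b : Int) (l : List Int) :
    pairSlices s (a :: b :: l) = PySem.List.slice s (some a) (some b) :: pairSlices s (b :: l) := rfl

theorem map_pyRange_eq_pairSlices (s : List (Int × Int)) :
    ∀ l : List Int,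
    (PySem.List.pyRange 0 ((l.length : Int) - 1) 1).map
      (fun j => PySem.List.slice s (some (PySem.List.pyGetD l j 0)) (some (PySem.List.pyGetD l (j + 1) 0))) =
    pairSlices s l := by
  intro l
  induction l with
  | nil => simp [pairSlices, PySem.List.pyRange_one_eq_nil]
  | cons a rest ih =>
    cases rest with
    | nil => simp [pairSlices, PySem.List.pyRange_one_eq_nil]
    | cons b l' =>
      have e : ((a :: b :: l').length : Int) - 1 = ((b :: l').length : Int) := by
        push_cast [List.length_cons]; ring
      rw [e]
      have hpos : (0 : Int) < ((b :: l').length : Int) := by push_cast [List.length_cons]; omega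
      rw [PySem.List.pyRange_one_cons hpos, List.map_cons]
      have hz : (0 : Int) + 1 = ((1 : Nat) : Int) := by norm_num
      have h0 : PySem.List.pyGetD (a :: b :: l') 0 0 = a := PySem.List.pyGetD_zero_cons ..
      have h1 : PySem.List.pyGetD (a :: b :: l') (0 + 1) 0 = b := by
        rw [pyGetD_cons_shift _ _ _ _ (by norm_num)]
        norm_num
      rw [h0, h1]
      have hsh : PySem.List.pyRange (0 + 1) (((b :: l').length : Int)) 1
          = (PySem.List.pyRange 0 (((b :: l').length : Int) - 1) 1).map (· + 1) := by
        have := pyRange_shift 0 (((b :: l').length : Int) - 1)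
        simpa using this
      rw [hsh, List.map_map]
      rw [pairSlices_cons₂, ← ih]
      congr 1
      refine List.map_congr_left (fun j hj => ?_)
      have hj0 : 0 ≤ j := by
        have := PySem.List.mem_pyRange_one.mp hj
        omega
      simp only [Function.comp]
      have g1 : PySem.List.pyGetD (a :: b :: l') (j + 1) 0 = PySem.List.pyGetD (b :: l') j 0 := by
        rw [pyGetD_cons_shift _ _ _ _ (by omega)]
        congr 1; ring
      have g2 : PySem.List.pyGetD (a :: b :: l') (j + 1 + 1) 0 = PySem.List.pyGetD (b :: l') (j + 1) 0 := by
        rw [pyGetD_cons_shift _ _ _ _ (by omega)]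
        congr 1; ring
      rw [g1, g2]

theorem pairSlices_shift (x : Int × Int) (t : List (Int × Int)) :
    ∀ l : List Int, (∀ r ∈ l, 0 ≤ r) →
    pairSlices (x :: t) (l.map (· + 1)) = pairSlices t l := by
  intro l
  induction l with
  | nil => intro _; rfl
  | cons a rest ih =>
    intro h
    cases rest with
    | nil => rfl
    | cons b l' =>
      simp only [List.map_cons] at *
      rw [pairSlices_cons₂, pairSlices_cons₂]
      rw [slice_cons_shift x t a b (h a (by simp)) (h b (by simp))]
      have := ih (fun r hr => h r (by simp [hr]))
      simpa using this

-- the break indices of s (definitionally the filter in cluster_1d_py_alt)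
def pvBreaks (tolerance : Int) (s : List (Int × Int)) : List Int :=
  (PySem.List.pyRange 1 (s.length : Int) 1).filter
    (fun i => tolerance < (PySem.List.pyGetD s i (0, 0)).1 - (PySem.List.pyGetD s (i - 1) (0, 0)).1)

theorem pvBreaks_nonneg (tolerance : Int) (s : List (Int × Int)) :
    ∀ r ∈ pvBreaks tolerance s, 0 ≤ r := by
  intro r hr
  have := PySem.List.mem_pyRange_one.mp (List.mem_of_mem_filter hr)
  omega

theorem pvBreaks_cons (tolerance : Int) (x y : Int × Int) (ys : List (Int × Int)) :
    pvBreaks tolerance (x :: y :: ys) =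
      (if y.1 - x.1 ≤ tolerance then [] else [1]) ++ (pvBreaks tolerance (y :: ys)).map (· + 1) := by
  unfold pvBreaks
  have hlen : ((x :: y :: ys).length : Int) = ((y :: ys).length : Int) + 1 := by
    push_cast [List.length_cons]; ring
  rw [hlen]
  have h1 : (1 : Int) < ((y :: ys).length : Int) + 1 := by
    have : (1 : Int) ≤ ((y :: ys).length : Int) := by
      have : 1 ≤ (y :: ys).length := by simp
      exact_mod_cast this
    omega
  rw [PySem.List.pyRange_one_cons h1]
  have hsh : PySem.List.pyRange (1 + 1) (((y :: ys).length : Int) + 1) 1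
      = (PySem.List.pyRange 1 ((y :: ys).length : Int) 1).map (· + 1) :=
    pyRange_shift 1 ((y :: ys).length : Int)
  rw [List.filter_cons, hsh, List.filter_map]
  have hpred1 : PySem.List.pyGetD (x :: y :: ys) (1 : Int) (0, 0) = y := by
    rw [pyGetD_cons_shift _ _ _ _ le_rfl]
    norm_num [PySem.List.pyGetD_zero_cons]
  have hpred0 : PySem.List.pyGetD (x :: y :: ys) ((1 : Int) - 1) (0, 0) = x := by
    norm_num [PySem.List.pyGetD_zero_cons]
  have hfc : (List.filter ((fun i => decide (tolerance < (PySem.List.pyGetD (x :: y :: ys) i (0, 0)).1 - (PySem.List.pyGetD (x :: y :: ys) (i - 1) (0, 0)).1)) ∘ (· + 1))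
        (PySem.List.pyRange 1 ((y :: ys).length : Int) 1))
      = List.filter (fun i => decide (tolerance < (PySem.List.pyGetD (y :: ys) i (0, 0)).1 - (PySem.List.pyGetD (y :: ys) (i - 1) (0, 0)).1))
        (PySem.List.pyRange 1 ((y :: ys).length : Int) 1) := by
    refine List.filter_congr (fun i hi => ?_)
    have hi1 : 1 ≤ i := (PySem.List.mem_pyRange_one.mp hi).1
    simp only [Function.comp, decide_eq_decide]
    have g1 : PySem.List.pyGetD (x :: y :: ys) (i + 1) (0, 0) = PySem.List.pyGetD (y :: ys) i (0, 0) := by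
      rw [pyGetD_cons_shift _ _ _ _ (by omega)]
      congr 1; ring
    have g2 : PySem.List.pyGetD (x :: y :: ys) (i + 1 - 1) (0, 0) = PySem.List.pyGetD (y :: ys) (i - 1) (0, 0) := by
      have e : i + 1 - 1 = (i - 1) + 1 := by ring
      rw [e, pyGetD_cons_shift _ _ _ _ (by omega)]
      congr 1; ring
    rw [g1, g2]
  rw [hfc, hpred1, hpred0]
  by_cases h : y.1 - x.1 ≤ tolerance
  · simp [show ¬ tolerance < y.1 - x.1 by omega, h]
  · simp [show tolerance < y.1 - x.1 by omega, h]

theorem pairSlices_breaks (tolerance : Int) (xs : List (Int × Int)) :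
    ∀ x : Int × Int,
    pairSlices (x :: xs) (0 :: (pvBreaks tolerance (x :: xs) ++ [((x :: xs).length : Int)])) =
      altGo tolerance x xs := by
  induction xs with
  | nil =>
    intro x
    have hb : pvBreaks tolerance [x] = [] := by
      unfold pvBreaks
      rw [PySem.List.pyRange_one_eq_nil (by norm_num)]
      rfl
    rw [hb]
    have e : (([x] : List (Int × Int)).length : Int) = 1 := by norm_num
    rw [e]
    show PySem.List.slice [x] (some 0) (some 1) :: pairSlices [x] [1] = [[x]]
    have : PySem.List.slice [x] (some 0) (some 1) = [x] := by
      rw [PySem.List.slice_toNat _ (by norm_num) (by norm_num)]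
      rfl
    rw [this]
    rfl
  | cons y ys ih =>
    intro x
    rw [pvBreaks_cons]
    have hlen : ((x :: y :: ys).length : Int) = ((y :: ys).length : Int) + 1 := by
      push_cast [List.length_cons]; ring
    rw [hlen]
    have hmap : (pvBreaks tolerance (y :: ys)).map (· + 1) ++ [((y :: ys).length : Int) + 1]
        = ((pvBreaks tolerance (y :: ys)) ++ [((y :: ys).length : Int)]).map (· + 1) := by
      simp
    have hLpos : ∀ r ∈ pvBreaks tolerance (y :: ys) ++ [((y :: ys).length : Int)], 0 ≤ r := by
      intro r hr
      rcases List.mem_append.mp hr with h' | h'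
      · exact pvBreaks_nonneg tolerance (y :: ys) r h'
      · simp at h'; subst h'; positivity
    obtain ⟨r, L'', hL⟩ := List.exists_cons_of_ne_nil
      (show pvBreaks tolerance (y :: ys) ++ [((y :: ys).length : Int)] ≠ [] by simp)
    have hr0 : 0 ≤ r := hLpos r (by rw [hL]; exact List.mem_cons_self ..)
    have ihy : pairSlices (y :: ys) (0 :: (pvBreaks tolerance (y :: ys) ++ [((y :: ys).length : Int)])) = altGo tolerance y ys := ih y
    rw [hL] at ihy
    rw [pairSlices_cons₂] at ihy
    have hshift : pairSlices (x :: y :: ys) ((r + 1) :: L''.map (· + 1)) = pairSlices (y :: ys) (r :: L'') := by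
      have := pairSlices_shift x (y :: ys) (r :: L'') (by rw [← hL]; exact hLpos)
      simpa using this
    by_cases h : y.1 - x.1 ≤ tolerance
    · rw [if_pos h, List.nil_append, hmap, hL]
      rw [List.map_cons, pairSlices_cons₂]
      rw [slice_zero_succ _ _ _ hr0, hshift]
      show (x :: PySem.List.slice (y :: ys) (some 0) (some r)) :: pairSlices (y :: ys) (r :: L'') = altGo tolerance x (y :: ys)
      simp only [altGo, if_pos h]
      rw [← ihy]
    · rw [if_neg h, List.append_assoc, hmap, hL, List.map_cons]
      show PySem.List.slice (x :: y :: ys) (some 0) (some 1) :: pairSlices (x :: y :: ys) (1 :: (r + 1) :: L''.map (· + 1)) = altGo tolerance x (y :: ys)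
      have hsl : PySem.List.slice (x :: y :: ys) (some 0) (some 1) = [x] := by
        rw [PySem.List.slice_toNat _ (by norm_num) (by norm_num)]
        rfl
      rw [hsl, pairSlices_cons₂]
      have hsl2 : PySem.List.slice (x :: y :: ys) (some 1) (some (r + 1)) = PySem.List.slice (y :: ys) (some 0) (some r) := by
        have := slice_cons_shift x (y :: ys) 0 r le_rfl hr0
        simpa using this
      rw [hsl2, hshift]
      simp only [altGo, if_neg h]
      rw [← ihy]

-- ===== VERDICT (by name: the statement is the Claim_ definition above) =====
theorem cluster_1d_py_spec : Claim_equal_cluster_1d_py := by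
  intro pairs tolerance _
  unfold Spec_cluster_1d_py cluster_1d_py cluster_1d_py_alt
  by_cases hp : pairs = []
  · simp [hp]
  · simp only [hp, if_false]
    have hsne : PySem.List.sorted pairs (fun p => p.1) ≠ [] := by
      intro h
      apply hp
      have := PySem.List.length_sorted (xs := pairs) (key := fun p => p.1) (rev := false)
      rw [h] at this
      exact List.length_eq_zero_iff.mp this.symm
    cases hS : PySem.List.sorted pairs (fun p => p.1) with
    | nil => exact absurd hS hsne
    | cons x xs =>
      have hA : ((x :: xs).zip xs).foldl (pvStepA tolerance) [[x]] = altGo tolerance x xs := by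
        have h0 := foldA_eq_altGo tolerance xs x [] []
        simp only [List.nil_append] at h0
        rw [h0, pvAttach_nil _ (altGo_ne_nil tolerance x xs)]
      rw [map_pyRange_eq_pairSlices]
      exact hA.trans (pairSlices_breaks tolerance xs x).symm
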